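-- pv_equiv track=rewrite | github.com/raj713335/LeetCode | Easy/3740 Minimum Distance Between Three Equal Elements.py | minimumDistance
-- ===== SOURCE A (Python) =====
-- from typing import List
--
-- from collections import defaultdict
-- import math
--
-- def minimumDistance(nums: List[int]) -> int:
--
--     dictx = defaultdict(list)
--
--     for i in range(0, len(nums)):
--         dictx[nums[i]].append(i)
--
--     min_distance = math.inf
--
--
--     for key, elements in dictx.items():
--         if len(elements) >= 3:
--             for i in range(0, len(elements)-2):
--                 temp_distance = abs(elements[i] -  elements[i+1]) + abs(elements[i+1] -  elements[i+2]) + abs(elements[i+2] -  elements[i])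
--
--                 if temp_distance < min_distance:
--                     min_distance = temp_distance
--
--     return min_distance if min_distance < math.inf else -1
-- ===== SOURCE B (Python) =====
-- import math
--
-- def minimumDistance(nums):
--     last2 = {}
--     best = math.inf
--     for i, v in enumerate(nums):
--         p = last2.get(v)
--         if p is None:
--             last2[v] = [i]
--         elif len(p) == 1:
--             last2[v] = [p[0], i]
--         else:
--             p2, p1 = p
--             d = abs(p2 - p1) + abs(p1 - i) + abs(i - p2)
--             if d < best:
--                 best = d
--             last2[v] = [p1, i]
--     return best if best < math.inf else -1
-- ===== Notes on version B (the rewrite author's own statement) =====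
-- stated objective: alternative
-- what changed: Replaces A's two-phase approach (build the full per-value index list with a defaultdict, then a second nested pass scanning every consecutive index triple of every list) by a single pass that keeps only the last two indices seen for each value and updates the running minimum on the fly.
import Mathlib
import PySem

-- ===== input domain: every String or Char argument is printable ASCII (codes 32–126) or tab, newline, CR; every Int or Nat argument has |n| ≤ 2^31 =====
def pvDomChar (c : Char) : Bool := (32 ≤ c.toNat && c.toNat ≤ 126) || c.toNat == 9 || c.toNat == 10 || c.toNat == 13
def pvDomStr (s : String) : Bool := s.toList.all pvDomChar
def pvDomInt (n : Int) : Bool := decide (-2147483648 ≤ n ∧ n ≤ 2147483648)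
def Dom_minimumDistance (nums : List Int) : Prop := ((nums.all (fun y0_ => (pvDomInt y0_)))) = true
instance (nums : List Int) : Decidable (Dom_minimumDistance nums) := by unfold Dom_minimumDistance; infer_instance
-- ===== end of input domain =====

-- B replaces A's two-phase scheme (defaultdict of all index lists, then a nested scan of every
-- consecutive index triple) by a single pass keeping only the last two indices per value; same result.

-- shared helper: the Python idiom 'if t < best: best = t' with best starting at math.inf
-- (none = math.inf, so the final 'best if best < math.inf else -1' is the match on the Option)
def updMin (m : Option Int) (t : Int) : Option Int :=
  match m with
  | none => some t
  | some b => if t < b then some t else some b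

-- ===== PORT A =====
-- for i in range(len(nums)): dictx[nums[i]].append(i)
def buildA (nums : List Int) : PySem.Dict Int (List Int) :=
  (PySem.List.enumerate nums).foldl
    (fun d p => d.modify p.2 [] (fun l => l ++ [p.1])) PySem.Dict.empty

-- the inner 'for i in range(0, len(elements)-2)' loop of A
def innerA (es : List Int) (m : Option Int) : Option Int :=
  (PySem.List.pyRange 0 ((es.length : Int) - 2) 1).foldl (fun m i =>
    let t := |PySem.List.pyGetD es i 0 - PySem.List.pyGetD es (i + 1) 0| +
             |PySem.List.pyGetD es (i + 1) 0 - PySem.List.pyGetD es (i + 2) 0| +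
             |PySem.List.pyGetD es (i + 2) 0 - PySem.List.pyGetD es i 0|
    updMin m t) m

def minimumDistance (nums : List Int) : Int :=
  let m := (buildA nums).items.foldl
    (fun m kv => if kv.2.length ≥ 3 then innerA kv.2 m else m) none
  match m with
  | some d => d
  | none => -1

-- ===== PORT B =====
-- one loop iteration of B: last2 holds the most recent one or two indices of each value
def stepB (st : PySem.Dict Int (List Int) × Option Int) (p : Int × Int) :
    PySem.Dict Int (List Int) × Option Int :=
  match st.1.get? p.2 with
  | none => (st.1.insert p.2 [p.1], st.2)
  | some [q] => (st.1.insert p.2 [q, p.1], st.2)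
  | some (p2 :: p1 :: _) =>
      let d := |p2 - p1| + |p1 - p.1| + |p.1 - p2|
      (st.1.insert p.2 [p1, p.1], updMin st.2 d)
  | some [] => st

def minimumDistance_alt (nums : List Int) : Int :=
  let st := (PySem.List.enumerate nums).foldl stepB (PySem.Dict.empty, none)
  match st.2 with
  | some b => b
  | none => -1

-- ===== PRECONDITION & SPEC =====
def Spec_minimumDistance (nums : List Int) (out : Int) : Prop := out = minimumDistance_alt nums
instance (nums : List Int) (out : Int) : Decidable (Spec_minimumDistance nums out) := by unfold Spec_minimumDistance; infer_instance

-- ===== CLAIM (what is proved, stated in full; the proofs are below) =====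
def Claim_equal_minimumDistance : Prop := ∀ (nums : List Int), Dom_minimumDistance nums → Spec_minimumDistance nums (minimumDistance nums)

-- ===== LEMMAS AND PROOFS =====

-- the triple distance both programs compute
def dist3 (a b c : Int) : Int := |a - b| + |b - c| + |c - a|

-- distances of all consecutive index triples of one value's occurrence list
def tdists : List Int → List Int
  | a :: b :: c :: t => dist3 a b c :: tdists (b :: c :: t)
  | _ => []

-- the occurrence-index list of value v in nums
def occs (nums : List Int) (v : Int) : List Int :=
  ((PySem.List.enumerate nums).filter (fun p => p.2 == v)).map (fun p => p.1)

-- the last one or two elements of an occurrence list, exactly as B stores them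
def lasts (l : List Int) : Option (List Int) :=
  match l.reverse with
  | [] => none
  | [p] => some [p]
  | p1 :: p2 :: _ => some [p2, p1]

-- all triple distances A ever compares, grouped by first occurrence of the value
def dsA (nums : List Int) : List Int :=
  (PySem.Set.ofList nums).flatMap (fun v => tdists (occs nums v))

-- the (zero or one) new distance produced by appending one more x at index ns.length
def newd (ns : List Int) (x : Int) : List Int :=
  match lasts (occs ns x) with
  | some (p2 :: p1 :: _) => [dist3 p2 p1 (ns.length : Int)]
  | _ => []

lemma updMin_eq (m : Option Int) (t : Int) : updMin m t = some (min (m.getD t) t) := by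
  rcases m with _ | b
  · simp [updMin]
  · simp only [updMin, Option.getD]
    split_ifs <;> simp only [Option.some.injEq] <;> omega

lemma updMin_rcomm (m : Option Int) (a b : Int) :
    updMin (updMin m a) b = updMin (updMin m b) a := by
  rcases m with _ | c <;> simp [updMin_eq] <;> omega

lemma foldl_updMin_perm {l1 l2 : List Int} (h : l1.Perm l2) (i : Option Int) :
    List.foldl updMin i l1 = List.foldl updMin i l2 :=
  h.foldl_eq' (fun x _ y _ z => updMin_rcomm z x y) i

lemma tdists_short (l : List Int) (h : l.length < 3) : tdists l = [] := by
  rcases l with _ | ⟨a, _ | ⟨b, _ | ⟨c, t⟩⟩⟩ <;> first | rfl | (simp [tdists] at *; omega)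

lemma map_range_tdists (es : List Int) :
    (List.range (es.length - 2)).map
      (fun k => dist3 (es.getD k 0) (es.getD (k+1) 0) (es.getD (k+2) 0)) = tdists es := by
  induction es using tdists.induct with
  | case1 a b c t IH =>
    have hl : (a :: b :: c :: t).length - 2 = (t.length + 1) := by simp
    rw [hl, List.range_succ_eq_map, List.map_cons, List.map_map]
    simp only [List.getD_cons_zero, List.getD_cons_succ]
    rw [tdists]
    congr 1
  | case2 l h =>
    have hlen : l.length < 3 := by
      rcases l with _ | ⟨a, _ | ⟨b, _ | ⟨c, t⟩⟩⟩ <;> simp_all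
      exact absurd (h a b c t rfl) (by simp)
    rw [tdists_short l hlen]
    have h0 : l.length - 2 = 0 := by omega
    simp [h0]

lemma innerA_eq (es : List Int) (m : Option Int) :
    innerA es m = List.foldl updMin m (tdists es) := by
  rw [innerA, PySem.List.pyRange_one, List.foldl_map,
      ← map_range_tdists es, List.foldl_map]
  have hn : (((es.length : Int) - 2) - 0).toNat = es.length - 2 := by omega
  rw [hn]
  apply PySem.List.foldl_congr_mem
  intro acc k _
  have h1 : (0 : Int) + (k : Int) = ((k : Nat) : Int) := by ring
  have h2 : (k : Int) + 1 = (((k+1) : Nat) : Int) := by push_cast; ring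
  have h3 : (k : Int) + 2 = (((k+2) : Nat) : Int) := by push_cast; ring
  simp only [h1, h2, h3, PySem.List.pyGetD_natCast, dist3]

lemma buildA_getD (nums : List Int) (v : Int) :
    (buildA nums).getD v [] = occs nums v := by
  have h := PySem.Dict.getD_foldl_modify_append
    ((PySem.List.enumerate nums).map Prod.swap) (PySem.Dict.empty (ν := List Int)) v
  rw [List.foldl_map] at h
  simp only [Prod.swap] at h
  rw [buildA, occs, h]
  simp [List.filter_map, List.map_map, Function.comp_def]

lemma buildA_keys (nums : List Int) : (buildA nums).keys = PySem.Set.ofList nums := by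
  have h := PySem.Dict.keys_foldl_modify_key (PySem.List.enumerate nums)
    (fun p => p.2) ([] : List Int) (fun _ p => fun l => l ++ [p.1]) PySem.Dict.empty
  rw [buildA, h, PySem.List.map_snd_enumerate]
  rfl

lemma buildA_nodup (nums : List Int) : (buildA nums).keys.Nodup := by
  rw [buildA]
  exact PySem.Dict.nodup_keys_foldl_modify_key (PySem.List.enumerate nums)
    (fun p => p.2) ([] : List Int) (fun _ p => fun l => l ++ [p.1]) PySem.Dict.empty
    (by simp [PySem.Dict.keys_empty])

lemma items_of_nodup {κ ν : Type} [BEq κ] [LawfulBEq κ] (d : PySem.Dict κ ν)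
    (h : d.keys.Nodup) (v0 : ν) :
    d.items = d.keys.map (fun k => (k, d.getD k v0)) := by
  have hk : d.keys = d.items.map (fun p => p.1) := by simp [PySem.Dict.keys]
  rw [hk, List.map_map]
  conv_lhs => rw [← List.map_id d.items]
  apply List.map_congr_left
  intro p hp
  have hgd := PySem.Dict.getD_of_mem_items d (k := p.1) (v := p.2) (by simpa using hp) h v0
  simp [Function.comp, hgd]

lemma A_eq (nums : List Int) :
    minimumDistance nums =
      (match List.foldl updMin none (dsA nums) with
       | some d => d
       | none => -1) := by
  have h1 : (buildA nums).items.foldl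
      (fun m kv => if kv.2.length ≥ 3 then innerA kv.2 m else m) none
      = List.foldl updMin none (dsA nums) := by
    rw [items_of_nodup (buildA nums) (buildA_nodup nums) ([] : List Int), List.foldl_map,
        buildA_keys, dsA, List.foldl_flatMap]
    apply PySem.List.foldl_congr_mem
    intro m k _
    simp only [buildA_getD]
    by_cases h3 : (occs nums k).length ≥ 3
    · simp only [if_pos h3, innerA_eq]
    · rw [if_neg h3, tdists_short _ (by omega), List.foldl_nil]
  rw [minimumDistance, h1]

lemma lasts_append (l : List Int) (n : Int) :
    lasts (l ++ [n]) =
      (match lasts l with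
       | none => some [n]
       | some [] => some [n]
       | some [p] => some [p, n]
       | some (_ :: p1 :: _) => some [p1, n]) := by
  rcases hr : l.reverse with _ | ⟨p1, _ | ⟨p2, r⟩⟩ <;>
    simp [lasts, List.reverse_append, hr]

lemma lasts_ne_some_nil (l : List Int) : lasts l ≠ some [] := by
  rcases hr : l.reverse with _ | ⟨p1, _ | ⟨p2, r⟩⟩ <;> simp [lasts, hr]

lemma lasts_cons (a : Int) (l : List Int) (h : 2 ≤ l.length) : lasts (a :: l) = lasts l := by
  rcases hr : l.reverse with _ | ⟨p1, _ | ⟨p2, r⟩⟩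
  · have hl0 : l = [] := by simpa using congrArg List.reverse hr
    subst hl0; simp at h
  · have hl1 : l = [p1] := by simpa using congrArg List.reverse hr
    subst hl1; simp at h
  · simp [lasts, List.reverse_cons, hr]

lemma tdists_append (l : List Int) (n : Int) :
    tdists (l ++ [n]) = tdists l ++
      (match lasts l with
       | some (p2 :: p1 :: _) => [dist3 p2 p1 n]
       | _ => []) := by
  induction l with
  | nil => simp [tdists, lasts]
  | cons a l IH =>
    rcases l with _ | ⟨b, _ | ⟨c, t⟩⟩
    · simp [tdists, lasts]
    · simp [tdists, lasts]
    · have hcons : lasts (a :: b :: c :: t) = lasts (b :: c :: t) := lasts_cons _ _ (by simp)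
      show tdists (a :: b :: c :: (t ++ [n])) = _
      rw [tdists, show b :: c :: (t ++ [n]) = (b :: c :: t) ++ [n] from rfl, IH, hcons]
      conv_rhs => rw [tdists]
      simp

lemma occs_append (ns : List Int) (x v : Int) :
    occs (ns ++ [x]) v = occs ns v ++ (if x == v then [(ns.length : Int)] else []) := by
  by_cases hv : (x == v) <;>
    simp [occs, PySem.List.enumerate_append, PySem.List.enumerate_cons,
      PySem.List.enumerate_nil, List.filter_append, hv]

lemma occs_nil_of_not_mem (ns : List Int) (x : Int) (h : x ∉ ns) : occs ns x = [] := by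
  rw [occs]
  have hf : (PySem.List.enumerate ns).filter (fun p => p.2 == x) = [] := by
    rw [List.filter_eq_nil_iff]
    intro p hp
    rw [PySem.List.mem_enumerate_iff] at hp
    obtain ⟨k, hk, rfl⟩ := hp
    simp only [beq_iff_eq]
    intro heq
    exact h (heq ▸ List.getElem_mem hk)
  rw [hf, List.map_nil]

lemma dsA_append (ns : List Int) (x : Int) :
    (dsA (ns ++ [x])).Perm (dsA ns ++ newd ns x) := by
  have hof : PySem.Set.ofList (ns ++ [x]) = (PySem.Set.ofList ns).add x := by
    rw [PySem.Set.ofList_append]; rfl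
  have hne : ∀ v, v ≠ x → occs (ns ++ [x]) v = occs ns v := by
    intro v hv
    rw [occs_append]
    have : (x == v) = false := by simp only [beq_eq_false_iff_ne]; exact fun h => hv h.symm
    simp [this]
  have hocx : occs (ns ++ [x]) x = occs ns x ++ [(ns.length : Int)] := by
    rw [occs_append]; simp
  have htx : tdists (occs (ns ++ [x]) x) = tdists (occs ns x) ++ newd ns x := by
    rw [hocx, tdists_append, newd]
  by_cases hmem : x ∈ ns
  · have hmem' : x ∈ PySem.Set.ofList ns := (PySem.Set.mem_ofList ns x).mpr hmem
    obtain ⟨k1, k2, hsplit⟩ := List.append_of_mem hmem'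
    have hnd := PySem.Set.nodup_ofList ns
    rw [hsplit, List.nodup_append] at hnd
    obtain ⟨hnd1, hnd2, hdisj⟩ := hnd
    have hx1 : x ∉ k1 := fun hc => hdisj x hc x (List.mem_cons_self) rfl
    have hx2 : x ∉ k2 := (List.nodup_cons.mp hnd2).1
    rw [dsA, dsA, hof, PySem.Set.add_of_mem hmem', hsplit,
        List.flatMap_append, List.flatMap_append, List.flatMap_cons, List.flatMap_cons, htx]
    rw [List.flatMap_congr (l := k1)
          (f := fun v => tdists (occs (ns ++ [x]) v)) (g := fun v => tdists (occs ns v))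
          (fun v hv => show tdists (occs (ns ++ [x]) v) = tdists (occs ns v) by
            rw [hne v (fun h => hx1 (h ▸ hv))]),
        List.flatMap_congr (l := k2)
          (f := fun v => tdists (occs (ns ++ [x]) v)) (g := fun v => tdists (occs ns v))
          (fun v hv => show tdists (occs (ns ++ [x]) v) = tdists (occs ns v) by
            rw [hne v (fun h => hx2 (h ▸ hv))])]
    simp only [List.append_assoc]
    exact List.Perm.append_left _ (List.Perm.append_left _ List.perm_append_comm)
  · have hnm' : x ∉ PySem.Set.ofList ns := fun hc => hmem ((PySem.Set.mem_ofList ns x).mp hc)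
    have h0 : occs ns x = [] := occs_nil_of_not_mem ns x hmem
    have hnd0 : newd ns x = [] := by rw [newd, h0]; rfl
    rw [dsA, dsA, hof, PySem.Set.add_of_not_mem hnm', List.flatMap_append,
        List.flatMap_cons, List.flatMap_nil, List.append_nil, htx, h0, hnd0]
    rw [List.flatMap_congr (l := PySem.Set.ofList ns)
          (f := fun v => tdists (occs (ns ++ [x]) v)) (g := fun v => tdists (occs ns v))
          (fun v hv => show tdists (occs (ns ++ [x]) v) = tdists (occs ns v) by
            rw [hne v (fun h => hnm' (h ▸ hv))])]
    simp [tdists]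

lemma B_inv (nums : List Int) :
    (∀ v, ((PySem.List.enumerate nums).foldl stepB (PySem.Dict.empty, none)).1.get? v
            = lasts (occs nums v))
    ∧ ((PySem.List.enumerate nums).foldl stepB (PySem.Dict.empty, none)).2
        = List.foldl updMin none (dsA nums) := by
  induction nums using List.reverseRecOn with
  | nil =>
    refine ⟨fun v => ?_, ?_⟩
    · simp [PySem.List.enumerate_nil, occs, lasts, PySem.Dict.get?_empty]
    · simp [PySem.List.enumerate_nil, dsA]
  | append_singleton ns x IH =>
    obtain ⟨IH1, IH2⟩ := IH
    rw [PySem.List.enumerate_append, List.foldl_append]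
    simp only [PySem.List.enumerate_cons, PySem.List.enumerate_nil, List.foldl_cons,
      List.foldl_nil, zero_add]
    have hfold : List.foldl updMin none (dsA (ns ++ [x]))
        = List.foldl updMin (List.foldl updMin none (dsA ns)) (newd ns x) := by
      rw [foldl_updMin_perm (dsA_append ns x), List.foldl_append]
    have hget := IH1 x
    have hla := lasts_append (occs ns x) ((ns.length : Int))
    rcases hl : lasts (occs ns x) with _ | L
    · rw [hl] at hget hla
      refine ⟨fun v => ?_, ?_⟩
      · simp only [stepB, hget]
        by_cases hv : v = x
        · subst hv
          rw [PySem.Dict.get?_insert_self, occs_append, if_pos (by simp), hla]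
        · rw [PySem.Dict.get?_insert_of_ne _ _ hv, IH1 v, occs_append,
            if_neg (by simp only [beq_iff_eq]; exact fun h => hv h.symm), List.append_nil]
      · simp only [stepB, hget]
        rw [hfold, newd, hl, List.foldl_nil, IH2]
    · rcases L with _ | ⟨q, _ | ⟨q2, rest⟩⟩
      · exact absurd hl (lasts_ne_some_nil _)
      · rw [hl] at hget hla
        refine ⟨fun v => ?_, ?_⟩
        · simp only [stepB, hget]
          by_cases hv : v = x
          · subst hv
            rw [PySem.Dict.get?_insert_self, occs_append, if_pos (by simp), hla]
          · rw [PySem.Dict.get?_insert_of_ne _ _ hv, IH1 v, occs_append,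
              if_neg (by simp only [beq_iff_eq]; exact fun h => hv h.symm), List.append_nil]
        · simp only [stepB, hget]
          rw [hfold, newd, hl, List.foldl_nil, IH2]
      · rw [hl] at hget hla
        refine ⟨fun v => ?_, ?_⟩
        · simp only [stepB, hget]
          by_cases hv : v = x
          · subst hv
            rw [PySem.Dict.get?_insert_self, occs_append, if_pos (by simp), hla]
          · rw [PySem.Dict.get?_insert_of_ne _ _ hv, IH1 v, occs_append,
              if_neg (by simp only [beq_iff_eq]; exact fun h => hv h.symm), List.append_nil]
        · simp only [stepB, hget]
          rw [hfold, newd, hl, List.foldl_cons, List.foldl_nil, IH2]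
          rfl

-- ===== VERDICT (by name: the statement is the Claim_ definition above) =====
theorem minimumDistance_spec : Claim_equal_minimumDistance := by
  intro nums _
  unfold Spec_minimumDistance minimumDistance_alt
  rw [A_eq nums]
  simp only [(B_inv nums).2]
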